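-- pv_equiv track=rewrite | github.com/Techinnovom/vaultria | tools/gen_vaelic_textbook_css.py | vaultify_textbook_css
-- ===== SOURCE A (Python) =====
-- def vaultify_textbook_css(s: str) -> str:
--     """Map standalone light-theme hex colors to site vault tokens."""
--     pairs: list[tuple[str, str]] = [
--         ("#faf8f2", "var(--bg-elevated)"),
--         ("#faf6ee", "rgba(201, 169, 98, 0.06)"),
--         ("#fffbf0", "rgba(201, 169, 98, 0.08)"),
--         ("#fffef9", "transparent"),
--         ("#f8f4ec", "var(--bg-elevated)"),
--         ("#f4f0e8", "rgba(28, 32, 41, 0.85)"),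
--         ("#ece8e0", "var(--border)"),
--         ("#e8e0d0", "var(--border)"),
--         ("#e8d8a0", "rgba(201, 169, 98, 0.28)"),
--         ("#e0d8c8", "var(--border)"),
--         ("#e0d4b8", "var(--border)"),
--         ("#d8d0c0", "var(--border)"),
--         ("#f0b0b0", "rgba(200, 64, 64, 0.35)"),
--         ("#b0d0b0", "rgba(74, 152, 112, 0.35)"),
--         ("#b0c0e0", "rgba(90, 138, 200, 0.35)"),
--         ("#c0b0d8", "rgba(136, 80, 200, 0.35)"),
--         ("#8a5a1a", "var(--gold)"),
--         ("#8a6820", "var(--gold-dim)"),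
--         ("#6a5e4a", "var(--text-muted)"),
--         ("#6a5840", "var(--text-muted)"),
--         ("#6a4a1a", "var(--gold-dim)"),
--         ("#4a3f30", "var(--text-muted)"),
--         ("#3a3020", "var(--text-muted)"),
--         ("#2a221a", "var(--text)"),
--         ("#1a1610", "var(--text)"),
--         ("#8a7860", "var(--gold-dim)"),
--         ("#6a5840", "var(--text-muted)"),
--         ("#ddd", "rgba(255, 255, 255, 0.1)"),
--         ("#ccc", "rgba(255, 255, 255, 0.14)"),
--         ("#aaa", "var(--text-muted)"),
--         ("#c8a84c", "var(--gold)"),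
--         ("#c04040", "var(--tb-sharp)"),
--         ("#407840", "var(--tb-soft)"),
--         ("#405880", "var(--tb-hard)"),
--         ("#604880", "var(--tb-flow)"),
--         ("'Source Sans 3', sans-serif", '"Cinzel", serif'),
--         ('"Source Sans 3", sans-serif', '"Cinzel", serif'),
--         ("'Lora', serif", '"Crimson Pro", serif'),
--         ('"Lora", serif', '"Crimson Pro", serif'),
--     ]
--     for old, new in pairs:
--         s = s.replace(old, new)
--     return s
-- ===== SOURCE B (Python) =====
-- _ROWS = [
--     "#faf8f2\tvar(--bg-elevated)",
--     "#faf6ee\trgba(201, 169, 98, 0.06)",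
--     "#fffbf0\trgba(201, 169, 98, 0.08)",
--     "#fffef9\ttransparent",
--     "#f8f4ec\tvar(--bg-elevated)",
--     "#f4f0e8\trgba(28, 32, 41, 0.85)",
--     "#ece8e0\tvar(--border)",
--     "#e8e0d0\tvar(--border)",
--     "#e8d8a0\trgba(201, 169, 98, 0.28)",
--     "#e0d8c8\tvar(--border)",
--     "#e0d4b8\tvar(--border)",
--     "#d8d0c0\tvar(--border)",
--     "#f0b0b0\trgba(200, 64, 64, 0.35)",
--     "#b0d0b0\trgba(74, 152, 112, 0.35)",
--     "#b0c0e0\trgba(90, 138, 200, 0.35)",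
--     "#c0b0d8\trgba(136, 80, 200, 0.35)",
--     "#8a5a1a\tvar(--gold)",
--     "#8a6820\tvar(--gold-dim)",
--     "#6a5e4a\tvar(--text-muted)",
--     "#6a5840\tvar(--text-muted)",
--     "#6a4a1a\tvar(--gold-dim)",
--     "#4a3f30\tvar(--text-muted)",
--     "#3a3020\tvar(--text-muted)",
--     "#2a221a\tvar(--text)",
--     "#1a1610\tvar(--text)",
--     "#8a7860\tvar(--gold-dim)",
--     "#6a5840\tvar(--text-muted)",
--     "#ddd\trgba(255, 255, 255, 0.1)",
--     "#ccc\trgba(255, 255, 255, 0.14)",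
--     "#aaa\tvar(--text-muted)",
--     "#c8a84c\tvar(--gold)",
--     "#c04040\tvar(--tb-sharp)",
--     "#407840\tvar(--tb-soft)",
--     "#405880\tvar(--tb-hard)",
--     "#604880\tvar(--tb-flow)",
--     "'Source Sans 3', sans-serif\t\"Cinzel\", serif",
--     "\"Source Sans 3\", sans-serif\t\"Cinzel\", serif",
--     "'Lora', serif\t\"Crimson Pro\", serif",
--     "\"Lora\", serif\t\"Crimson Pro\", serif",
-- ]
--
--
-- def vaultify_textbook_css(s: str) -> str:
--     """Map standalone light-theme hex colors to site vault tokens."""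
--     # One left-to-right pass over s driven by a token table kept as
--     # tab-separated rows: at each position try the tokens longest-first;
--     # on a hit emit the replacement and jump past the token.
--     mapping = {}
--     for row in _ROWS:
--         old, new = row.split("\t")
--         mapping[old] = new
--     keys = sorted(mapping, key=len, reverse=True)
--     out = []
--     i, n = 0, len(s)
--     while i < n:
--         for k in keys:
--             if s.startswith(k, i):
--                 out.append(mapping[k])
--                 i += len(k)
--                 break
--         else:
--             out.append(s[i])
--             i += 1
--     return "".join(out)
-- ===== Notes on version B (the rewrite author's own statement) =====
-- stated objective: alternative
-- what changed: Instead of 39 sequential full-string str.replace passes over a list of pairs, B parses its token table from tab-separated rows into a dict once and makes a single left-to-right scan over the string, trying the tokens longest-first at each position and emitting the replacement on a hit.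
import Mathlib
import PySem

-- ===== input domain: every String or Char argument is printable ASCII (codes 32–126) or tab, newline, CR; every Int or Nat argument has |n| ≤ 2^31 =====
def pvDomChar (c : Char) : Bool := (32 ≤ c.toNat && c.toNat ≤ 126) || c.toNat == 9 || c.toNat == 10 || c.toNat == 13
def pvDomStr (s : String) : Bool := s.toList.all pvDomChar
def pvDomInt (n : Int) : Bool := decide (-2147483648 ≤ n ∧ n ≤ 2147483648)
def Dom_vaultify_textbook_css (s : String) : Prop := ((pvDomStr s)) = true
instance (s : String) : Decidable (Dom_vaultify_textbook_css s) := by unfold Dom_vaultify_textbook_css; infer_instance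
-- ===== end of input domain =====

-- B replaces A's 39 sequential str.replace passes by ONE left-to-right scan driven by a
-- token table parsed from tab-separated text (objective: alternative algorithm, same result).

-- ===== PORT A =====
-- A's literal pairs list, then: for old, new in pairs: s = s.replace(old, new)
def pvPairs : List (String × String) := [
  ("#faf8f2", "var(--bg-elevated)"),
  ("#faf6ee", "rgba(201, 169, 98, 0.06)"),
  ("#fffbf0", "rgba(201, 169, 98, 0.08)"),
  ("#fffef9", "transparent"),
  ("#f8f4ec", "var(--bg-elevated)"),
  ("#f4f0e8", "rgba(28, 32, 41, 0.85)"),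
  ("#ece8e0", "var(--border)"),
  ("#e8e0d0", "var(--border)"),
  ("#e8d8a0", "rgba(201, 169, 98, 0.28)"),
  ("#e0d8c8", "var(--border)"),
  ("#e0d4b8", "var(--border)"),
  ("#d8d0c0", "var(--border)"),
  ("#f0b0b0", "rgba(200, 64, 64, 0.35)"),
  ("#b0d0b0", "rgba(74, 152, 112, 0.35)"),
  ("#b0c0e0", "rgba(90, 138, 200, 0.35)"),
  ("#c0b0d8", "rgba(136, 80, 200, 0.35)"),
  ("#8a5a1a", "var(--gold)"),
  ("#8a6820", "var(--gold-dim)"),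
  ("#6a5e4a", "var(--text-muted)"),
  ("#6a5840", "var(--text-muted)"),
  ("#6a4a1a", "var(--gold-dim)"),
  ("#4a3f30", "var(--text-muted)"),
  ("#3a3020", "var(--text-muted)"),
  ("#2a221a", "var(--text)"),
  ("#1a1610", "var(--text)"),
  ("#8a7860", "var(--gold-dim)"),
  ("#6a5840", "var(--text-muted)"),
  ("#ddd", "rgba(255, 255, 255, 0.1)"),
  ("#ccc", "rgba(255, 255, 255, 0.14)"),
  ("#aaa", "var(--text-muted)"),
  ("#c8a84c", "var(--gold)"),
  ("#c04040", "var(--tb-sharp)"),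
  ("#407840", "var(--tb-soft)"),
  ("#405880", "var(--tb-hard)"),
  ("#604880", "var(--tb-flow)"),
  ("'Source Sans 3', sans-serif", "\"Cinzel\", serif"),
  ("\"Source Sans 3\", sans-serif", "\"Cinzel\", serif"),
  ("'Lora', serif", "\"Crimson Pro\", serif"),
  ("\"Lora\", serif", "\"Crimson Pro\", serif")]

def vaultify_textbook_css (s : String) : String :=
  pvPairs.foldl (fun acc p => PySem.Str.replace acc p.1 p.2) s

-- ===== PORT B =====
-- B keeps the token table as tab-separated rows and parses it into a dict
def bRows : List String := [
  "#faf8f2\tvar(--bg-elevated)",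
  "#faf6ee\trgba(201, 169, 98, 0.06)",
  "#fffbf0\trgba(201, 169, 98, 0.08)",
  "#fffef9\ttransparent",
  "#f8f4ec\tvar(--bg-elevated)",
  "#f4f0e8\trgba(28, 32, 41, 0.85)",
  "#ece8e0\tvar(--border)",
  "#e8e0d0\tvar(--border)",
  "#e8d8a0\trgba(201, 169, 98, 0.28)",
  "#e0d8c8\tvar(--border)",
  "#e0d4b8\tvar(--border)",
  "#d8d0c0\tvar(--border)",
  "#f0b0b0\trgba(200, 64, 64, 0.35)",
  "#b0d0b0\trgba(74, 152, 112, 0.35)",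
  "#b0c0e0\trgba(90, 138, 200, 0.35)",
  "#c0b0d8\trgba(136, 80, 200, 0.35)",
  "#8a5a1a\tvar(--gold)",
  "#8a6820\tvar(--gold-dim)",
  "#6a5e4a\tvar(--text-muted)",
  "#6a5840\tvar(--text-muted)",
  "#6a4a1a\tvar(--gold-dim)",
  "#4a3f30\tvar(--text-muted)",
  "#3a3020\tvar(--text-muted)",
  "#2a221a\tvar(--text)",
  "#1a1610\tvar(--text)",
  "#8a7860\tvar(--gold-dim)",
  "#6a5840\tvar(--text-muted)",
  "#ddd\trgba(255, 255, 255, 0.1)",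
  "#ccc\trgba(255, 255, 255, 0.14)",
  "#aaa\tvar(--text-muted)",
  "#c8a84c\tvar(--gold)",
  "#c04040\tvar(--tb-sharp)",
  "#407840\tvar(--tb-soft)",
  "#405880\tvar(--tb-hard)",
  "#604880\tvar(--tb-flow)",
  "'Source Sans 3', sans-serif\t\"Cinzel\", serif",
  "\"Source Sans 3\", sans-serif\t\"Cinzel\", serif",
  "'Lora', serif\t\"Crimson Pro\", serif",
  "\"Lora\", serif\t\"Crimson Pro\", serif"]

-- mapping = {}; for row in _ROWS: old, new = row.split("\t"); mapping[old] = new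
-- (split? is Python's str.split for a nonempty separator; getD [] is dead since "\t" ≠ "")
def bMapping : PySem.Dict String String :=
  bRows.foldl
    (fun m row =>
      match (PySem.Str.split? row "\t").getD [] with
      | [old, new] => m.insert old new
      | _ => m          -- unreachable on this table (every row has exactly one tab)
      )
    PySem.Dict.empty

-- keys = sorted(mapping, key=len, reverse=True)
def bKeys : List String := PySem.List.sorted bMapping.keys PySem.Str.len true

-- the scanner's token table: each candidate key with its replacement mapping[k]
-- (the loop-invariant lookup mapping[k] is hoisted here; mapping is never mutated, so this is exact)
def bTable : List (List Char × List Char) :=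
  bKeys.map (fun k => (k.toList, (bMapping.getD k "").toList))

-- termination fact for the scanner: every token in the table is nonempty
set_option maxRecDepth 100000 in
theorem bTable_key_ne_nil : ∀ q ∈ bTable, q.1 ≠ [] := by decide

-- the while-loop of B: at each position try the tokens (longest first); on a hit emit the
-- replacement and jump past the token, else copy the character
set_option maxRecDepth 100000 in
def bScan (cs : List Char) : List Char :=
  match cs with
  | [] => []
  | c :: t =>
    match hf : bTable.find? (fun q => q.1.isPrefixOf (c :: t)) with
    | some q => q.2 ++ bScan ((c :: t).drop q.1.length)
    | none => c :: bScan t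
termination_by cs.length
decreasing_by
  · have hm := List.mem_of_find?_eq_some hf
    have hp := (List.isPrefixOf_iff_prefix).mp
      (List.find?_some (p := fun q : List Char × List Char => q.1.isPrefixOf (c :: t)) hf)
    have hk := bTable_key_ne_nil _ hm
    have h1 := hp.length_le
    have h2 : 0 < q.1.length := List.length_pos_iff.mpr hk
    simp only [List.length_drop, List.length_cons] at *
    omega
  · simp

def vaultify_textbook_css_alt (s : String) : String :=
  String.ofList (bScan s.toList)

-- ===== PRECONDITION & SPEC =====
def Spec_vaultify_textbook_css (s : String) (out : String) : Prop := out = vaultify_textbook_css_alt s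
instance (s : String) (out : String) : Decidable (Spec_vaultify_textbook_css s out) := by unfold Spec_vaultify_textbook_css; infer_instance

-- ===== CLAIM (what is proved, stated in full; the proofs are below) =====
def Claim_equal_vaultify_textbook_css : Prop := ∀ (s : String), Dom_vaultify_textbook_css s → Spec_vaultify_textbook_css s (vaultify_textbook_css s)

-- ===== LEMMAS AND PROOFS =====

-- the char-level version of A's replace chain
def chainF (acc : List Char) (p : String × String) : List Char :=
  PySem.Chars.replace acc p.1.toList p.2.toList
def chainC (cs : List Char) : List Char := pvPairs.foldl chainF cs

-- ---- decidable facts about the concrete data (checked by the kernel) ----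
-- every key has at least 2 characters
set_option maxRecDepth 10000 in
theorem pv_key_len : ∀ p ∈ pvPairs, 2 ≤ p.1.toList.length := by decide
-- distinct keys never start one another (no key is a prefix of another)
set_option maxRecDepth 10000 in
set_option maxHeartbeats 4000000 in
theorem pv_SC_k0 : ∀ pA ∈ pvPairs, ∀ pB ∈ pvPairs, pA.1.toList = pB.1.toList ∨
    (¬(pB.1.toList <+: pA.1.toList) ∧ ¬(pA.1.toList <+: pB.1.toList)) := by decide
-- a key never matches strictly inside another key (no overlaps)
set_option maxRecDepth 10000 in
set_option maxHeartbeats 4000000 in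
theorem pv_SC_kk : ∀ pA ∈ pvPairs, ∀ pB ∈ pvPairs, ∀ m ∈ List.range (pA.1.toList.length - 1),
    ¬(pB.1.toList <+: pA.1.toList.drop (m + 1)) ∧ ¬(pA.1.toList.drop (m + 1) <+: pB.1.toList) := by decide
-- a key never matches inside or spanning out of a replacement value
set_option maxRecDepth 10000 in
set_option maxHeartbeats 4000000 in
theorem pv_SC_vk : ∀ pA ∈ pvPairs, ∀ pB ∈ pvPairs, ∀ m ∈ List.range pA.2.toList.length,
    ¬(pB.1.toList <+: pA.2.toList.drop m) ∧ ¬(pA.2.toList.drop m <+: pB.1.toList) := by decide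
-- no nonempty suffix of a key's tail is comparable with any replacement value
set_option maxRecDepth 10000 in
set_option maxHeartbeats 4000000 in
theorem pv_SC_nc : ∀ pA ∈ pvPairs, ∀ pB ∈ pvPairs, ∀ w ∈ pA.1.toList.tail.tails, w = [] ∨
    (¬(w <+: pB.2.toList) ∧ ¬(pB.2.toList <+: w)) := by decide
-- the token table carries exactly the values A's pairs prescribe
set_option maxRecDepth 10000 in
set_option maxHeartbeats 4000000 in
theorem pv_table_val : ∀ q ∈ bTable, ∀ p ∈ pvPairs, p.1.toList ≠ q.1 ∨ p.2.toList = q.2 := by decide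
-- every pair key occurs in the token table, and conversely
set_option maxRecDepth 10000 in
set_option maxHeartbeats 4000000 in
theorem pv_table_covers : ∀ p ∈ pvPairs, ∃ q ∈ bTable, q.1 = p.1.toList := by decide
set_option maxRecDepth 10000 in
set_option maxHeartbeats 4000000 in
theorem pv_table_sub : ∀ q ∈ bTable, ∃ p ∈ pvPairs, p.1.toList = q.1 := by decide

-- ---- facts about PySem.Chars.replace ----
theorem go_acc (old new : List Char) : ∀ fuel l acc,
    PySem.Chars.replace.go old new fuel l acc = acc.reverse ++ PySem.Chars.replace.go old new fuel l [] := by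
  intro fuel
  induction fuel with
  | zero => intro l acc; simp [PySem.Chars.replace.go]
  | succ n ih =>
    intro l acc
    cases l with
    | nil => simp [PySem.Chars.replace.go]
    | cons c t =>
      simp only [PySem.Chars.replace.go]
      by_cases h : old.isPrefixOf (c :: t)
      · simp only [h, if_true]
        rw [ih _ (new.reverse ++ acc), ih _ (new.reverse ++ [])]
        simp
      · simp only [h]
        rw [ih _ (c :: acc), ih _ (c :: [])]
        simp

theorem go_succ_pos (old new : List Char) (c : Char) (t : List Char) (m : Nat)
    (h : old.isPrefixOf (c :: t) = true) :
    PySem.Chars.replace.go old new (m + 1) (c :: t) []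
      = new ++ PySem.Chars.replace.go old new m (List.drop old.length (c :: t)) [] := by
  simp only [PySem.Chars.replace.go, h, if_true]
  rw [go_acc old new m (List.drop old.length (c :: t)) (new.reverse ++ [])]
  simp

theorem go_succ_neg (old new : List Char) (c : Char) (t : List Char) (m : Nat)
    (h : ¬ old.isPrefixOf (c :: t) = true) :
    PySem.Chars.replace.go old new (m + 1) (c :: t) []
      = c :: PySem.Chars.replace.go old new m t [] := by
  simp only [PySem.Chars.replace.go, h]
  rw [go_acc old new m t (c :: [])]
  simp

theorem go_eq_replace (old new : List Char) (hold : old ≠ []) : ∀ n l, l.length = n →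
    ∀ fuel, l.length ≤ fuel →
    PySem.Chars.replace.go old new fuel l [] = PySem.Chars.replace l old new := by
  intro n
  induction n using Nat.strong_induction_on with
  | _ n ih =>
    intro l hn fuel hfuel
    cases l with
    | nil =>
      have : ∀ f, PySem.Chars.replace.go old new f ([] : List Char) [] = [] := by
        intro f; cases f <;> simp [PySem.Chars.replace.go]
      rw [this, PySem.Chars.replace]
      simp [List.isEmpty_iff, hold, this]
    | cons c t =>
      have hpos : 0 < old.length := List.length_pos_iff.mpr hold
      obtain ⟨m, rfl⟩ : ∃ m, fuel = m + 1 := by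
        cases fuel
        · simp at hfuel
        · exact ⟨_, rfl⟩
      have hrepl : PySem.Chars.replace (c :: t) old new
          = PySem.Chars.replace.go old new (t.length + 1) (c :: t) [] := by
        rw [PySem.Chars.replace]
        simp [List.isEmpty_iff, hold]
      by_cases h : old.isPrefixOf (c :: t) = true
      · rw [go_succ_pos _ _ _ _ _ h, hrepl, go_succ_pos _ _ _ _ _ h]
        have hd : (List.drop old.length (c :: t)).length < n := by
          simp only [List.length_drop, List.length_cons] at *
          omega
        rw [ih _ hd _ rfl _ (by simp only [List.length_drop, List.length_cons] at *; omega),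
            ih _ hd _ rfl _ (by simp only [List.length_drop, List.length_cons] at *; omega)]
      · rw [go_succ_neg _ _ _ _ _ h, hrepl, go_succ_neg _ _ _ _ _ h]
        have hd : t.length < n := by simp at hn; omega
        rw [ih _ hd _ rfl _ (by simp at hfuel ⊢; omega), ih _ hd _ rfl _ (by omega)]

theorem replace_nil (old new : List Char) (hold : old ≠ []) :
    PySem.Chars.replace [] old new = [] := by
  rw [PySem.Chars.replace]
  simp [List.isEmpty_iff, hold, PySem.Chars.replace.go]

theorem replace_pos (old new l : List Char) (hold : old ≠ []) (h : old <+: l) :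
    PySem.Chars.replace l old new = new ++ PySem.Chars.replace (l.drop old.length) old new := by
  have hpos : 0 < old.length := List.length_pos_iff.mpr hold
  cases l with
  | nil =>
    exfalso; exact hold (List.prefix_nil.mp h)
  | cons c t =>
    have hb : old.isPrefixOf (c :: t) = true := List.isPrefixOf_iff_prefix.mpr h
    have h1 : PySem.Chars.replace (c :: t) old new
        = PySem.Chars.replace.go old new (t.length + 1) (c :: t) [] := by
      rw [PySem.Chars.replace]; simp [List.isEmpty_iff, hold]
    rw [h1, go_succ_pos _ _ _ _ _ hb]
    congr 1
    exact go_eq_replace old new hold _ _ rfl _ (by simp [List.length_drop]; omega)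

theorem replace_neg (old new : List Char) (c : Char) (t : List Char) (hold : old ≠ [])
    (h : ¬ old <+: (c :: t)) :
    PySem.Chars.replace (c :: t) old new = c :: PySem.Chars.replace t old new := by
  have hb : ¬ old.isPrefixOf (c :: t) = true := fun hc => h (List.isPrefixOf_iff_prefix.mp hc)
  have h1 : PySem.Chars.replace (c :: t) old new
      = PySem.Chars.replace.go old new (t.length + 1) (c :: t) [] := by
    rw [PySem.Chars.replace]; simp [List.isEmpty_iff, hold]
  rw [h1, go_succ_neg _ _ _ _ _ hb]
  congr 1
  exact go_eq_replace old new hold _ _ rfl _ (by omega)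

theorem no_prefix_of_compat (old pfx t : List Char)
    (h1 : ¬(old <+: pfx)) (h2 : ¬(pfx <+: old)) : ¬ old <+: pfx ++ t := by
  intro h
  rcases le_or_gt old.length pfx.length with hle | hlt
  · exact h1 (List.prefix_of_prefix_length_le h (List.prefix_append pfx t) hle)
  · exact h2 (List.prefix_of_prefix_length_le (List.prefix_append pfx t) h (le_of_lt hlt))

theorem nocreate (old new : List Char) (hold : old ≠ []) :
    ∀ n t u, t.length = n → u ≠ [] →
      (∀ w, w ≠ [] → w <:+ u → ¬(w <+: new) ∧ ¬(new <+: w)) →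
      u <+: PySem.Chars.replace t old new → u <+: t := by
  intro n
  induction n using Nat.strong_induction_on with
  | _ n ih =>
    intro t u hn hu hsc hpre
    by_cases hp : old <+: t
    · rw [replace_pos old new t hold hp] at hpre
      exfalso
      rcases le_or_gt u.length new.length with hle | hlt
      · exact (hsc u hu List.suffix_rfl).1 (List.prefix_of_prefix_length_le hpre (List.prefix_append _ _) hle)
      · exact (hsc u hu List.suffix_rfl).2 (List.prefix_of_prefix_length_le (List.prefix_append _ _) hpre (le_of_lt hlt))
    · cases t with
      | nil =>
        rw [replace_nil old new hold] at hpre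
        exact absurd (List.prefix_nil.mp hpre) hu
      | cons c t' =>
        rw [replace_neg old new c t' hold hp] at hpre
        cases u with
        | nil => exact absurd rfl hu
        | cons x u' =>
          rw [List.cons_prefix_cons] at hpre
          obtain ⟨rfl, hpre'⟩ := hpre
          cases u' with
          | nil => simp [List.cons_prefix_cons]
          | cons y u'' =>
            rw [List.cons_prefix_cons]
            refine ⟨rfl, ?_⟩
            refine ih t'.length (by simp at hn; omega) t' (y :: u'') rfl (by simp) ?_ hpre'
            intro w hw hwsuf
            exact hsc w hw (hwsuf.trans (List.suffix_cons x (y :: u'')))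

theorem skip (old new : List Char) (hold : old ≠ []) :
    ∀ p t, (∀ m, m < p.length → ¬ old <+: p.drop m ++ t) →
      PySem.Chars.replace (p ++ t) old new = p ++ PySem.Chars.replace t old new := by
  intro p
  induction p with
  | nil => intro t _; simp
  | cons x p' ih =>
    intro t h
    have h0 : ¬ old <+: (x :: (p' ++ t)) := by
      have := h 0 (by simp)
      simpa using this
    rw [List.cons_append, replace_neg old new x (p' ++ t) hold h0, ih t ?_]
    · simp
    · intro m hm
      have := h (m + 1) (by simp; omega)
      simpa using this

theorem fold_nil (ps0 : List (String × String))
    (hlen : ∀ p ∈ ps0, 2 ≤ p.1.toList.length) :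
    ∀ ps : List (String × String), (∀ p ∈ ps, p ∈ ps0) → ps.foldl chainF [] = [] := by
  intro ps
  induction ps with
  | nil => intro _; rfl
  | cons pr rest ih =>
    intro hmem
    have hk2 := hlen pr (hmem pr List.mem_cons_self)
    have hkne : pr.1.toList ≠ [] := by
      intro h; rw [h] at hk2; simp at hk2
    simp only [List.foldl_cons]
    have h1 : chainF [] pr = [] := replace_nil _ _ hkne
    rw [h1]
    exact ih (fun p hp => hmem p (List.mem_cons_of_mem _ hp))

theorem fold_cons (ps0 : List (String × String))
    (hlen : ∀ p ∈ ps0, 2 ≤ p.1.toList.length)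
    (hnc : ∀ pA ∈ ps0, ∀ pB ∈ ps0, ∀ w ∈ pA.1.toList.tail.tails, w = [] ∨
      (¬(w <+: pB.2.toList) ∧ ¬(pB.2.toList <+: w))) :
    ∀ ps : List (String × String), (∀ p ∈ ps, p ∈ ps0) → ∀ (c : Char) (t : List Char),
      (∀ p ∈ ps, ¬ (p.1.toList <+: c :: t)) →
      ps.foldl chainF (c :: t) = c :: ps.foldl chainF t := by
  intro ps
  induction ps with
  | nil => intro _ c t _; rfl
  | cons pr rest ih =>
    intro hmem c t hnp
    have hprmem := hmem pr List.mem_cons_self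
    have hk2 := hlen pr hprmem
    have hkne : pr.1.toList ≠ [] := by intro h; rw [h] at hk2; simp at hk2
    simp only [List.foldl_cons]
    have h1 : chainF (c :: t) pr = c :: chainF t pr :=
      replace_neg _ _ _ _ hkne (hnp pr List.mem_cons_self)
    rw [h1]
    apply ih (fun p hp => hmem p (List.mem_cons_of_mem _ hp)) c (chainF t pr)
    intro p hp hpre
    have hpmem := hmem p (List.mem_cons_of_mem _ hp)
    have hp2 := hlen p hpmem
    cases hkl : p.1.toList with
    | nil => rw [hkl] at hp2; simp at hp2
    | cons x u' =>
      rw [hkl, List.cons_prefix_cons] at hpre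
      obtain ⟨rfl, hpre'⟩ := hpre
      have hu' : u' ≠ [] := by
        rw [hkl] at hp2; simp only [List.length_cons] at hp2
        intro h; rw [h] at hp2; simp at hp2
      have hut : u' <+: t := by
        refine nocreate pr.1.toList pr.2.toList hkne t.length t u' rfl hu' ?_ hpre'
        intro w hw hws
        have htl : p.1.toList.tail = u' := by rw [hkl]; rfl
        have hmemw : w ∈ p.1.toList.tail.tails := by
          rw [htl]; exact (List.mem_tails _ _).mpr hws
        rcases hnc p hpmem pr hprmem w hmemw with heq | hok
        · exact absurd heq hw
        · exact hok
      refine hnp p (List.mem_cons_of_mem _ hp) ?_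
      rw [hkl, List.cons_prefix_cons]
      exact ⟨rfl, hut⟩

theorem fold_skip (ps0 : List (String × String))
    (hlen : ∀ p ∈ ps0, 2 ≤ p.1.toList.length) :
    ∀ ps : List (String × String), (∀ p ∈ ps, p ∈ ps0) → ∀ (pfx t : List Char),
      (∀ p ∈ ps, ∀ m, m < pfx.length →
        ¬(p.1.toList <+: pfx.drop m) ∧ ¬(pfx.drop m <+: p.1.toList)) →
      ps.foldl chainF (pfx ++ t) = pfx ++ ps.foldl chainF t := by
  intro ps
  induction ps with
  | nil => intro _ pfx t _; rfl
  | cons pr rest ih =>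
    intro hmem pfx t h
    have hprmem := hmem pr List.mem_cons_self
    have hk2 := hlen pr hprmem
    have hkne : pr.1.toList ≠ [] := by intro hh; rw [hh] at hk2; simp at hk2
    simp only [List.foldl_cons]
    have h1 : chainF (pfx ++ t) pr = pfx ++ chainF t pr := by
      refine skip _ _ hkne pfx t ?_
      intro m hm
      exact no_prefix_of_compat _ _ _ (h pr List.mem_cons_self m hm).1 (h pr List.mem_cons_self m hm).2
    rw [h1]
    exact ih (fun p hp => hmem p (List.mem_cons_of_mem _ hp)) pfx (chainF t pr)
      (fun p hp => h p (List.mem_cons_of_mem _ hp))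

theorem chain_match (q : List Char × List Char) (hq : q ∈ bTable) (r : List Char) :
    chainC (q.1 ++ r) = q.2 ++ chainC r := by
  cases hf : pvPairs.find? (fun p => p.1.toList == q.1) with
  | none =>
    exfalso
    obtain ⟨p1, hp1mem, hp1k⟩ := pv_table_sub q hq
    have := List.find?_eq_none.mp hf p1 hp1mem
    simp [hp1k] at this
  | some p0 =>
    rw [List.find?_eq_some_iff_append] at hf
    obtain ⟨hp0k, as, bs, hsplit, hprev⟩ := hf
    have hp0k' : p0.1.toList = q.1 := by simpa using hp0k
    have hp0mem : p0 ∈ pvPairs := by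
      rw [hsplit]; exact List.mem_append_right _ List.mem_cons_self
    have hp0len := pv_key_len p0 hp0mem
    have hp0ne : p0.1.toList ≠ [] := by
      intro h; rw [h] at hp0len; simp at hp0len
    have hval : p0.2.toList = q.2 := by
      rcases pv_table_val q hq p0 hp0mem with h | h
      · exact absurd hp0k' h
      · exact h
    have hasmem : ∀ p ∈ as, p ∈ pvPairs := by
      intro p hp; rw [hsplit]; exact List.mem_append_left _ hp
    have hbsmem : ∀ p ∈ bs, p ∈ pvPairs := by
      intro p hp; rw [hsplit]; exact List.mem_append_right _ (List.mem_cons_of_mem _ hp)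
    have hkc : ∀ p ∈ as, ∀ m, m < q.1.length →
        ¬(p.1.toList <+: q.1.drop m) ∧ ¬(q.1.drop m <+: p.1.toList) := by
      intro p hp m hm
      have hpmem := hasmem p hp
      cases m with
      | zero =>
        have hne : p.1.toList ≠ q.1 := by
          have := hprev p hp; simpa using this
        rcases pv_SC_k0 p0 hp0mem p hpmem with h | h
        · rw [hp0k'] at h; exact absurd h.symm hne
        · rw [hp0k'] at h; simpa using h
      | succ m' =>
        have hm' : m' ∈ List.range (p0.1.toList.length - 1) := by
          rw [List.mem_range, hp0k']
          omega
        have h := pv_SC_kk p0 hp0mem p hpmem m' hm'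
        rw [hp0k'] at h
        exact h
    unfold chainC
    rw [hsplit, List.foldl_append, List.foldl_cons,
        fold_skip pvPairs pv_key_len as hasmem q.1 r hkc]
    have hstep : chainF (q.1 ++ as.foldl chainF r) p0 = q.2 ++ chainF (as.foldl chainF r) p0 := by
      unfold chainF
      rw [← hp0k', replace_pos _ _ _ hp0ne (List.prefix_append _ _), List.drop_left, hval]
    rw [hstep]
    have hvc : ∀ p ∈ bs, ∀ m, m < q.2.length →
        ¬(p.1.toList <+: q.2.drop m) ∧ ¬(q.2.drop m <+: p.1.toList) := by
      intro p hp m hm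
      have hmm : m ∈ List.range p0.2.toList.length := by
        rw [List.mem_range, hval]; exact hm
      have h := pv_SC_vk p0 hp0mem p (hbsmem p hp) m hmm
      rw [hval] at h
      exact h
    rw [fold_skip pvPairs pv_key_len bs hbsmem q.2 _ hvc, List.foldl_append, List.foldl_cons]

theorem chain_eq_scan : ∀ n cs, cs.length = n → chainC cs = bScan cs := by
  intro n
  induction n using Nat.strong_induction_on with
  | _ n ih =>
    intro cs hn
    cases cs with
    | nil =>
      rw [bScan]
      exact fold_nil pvPairs pv_key_len pvPairs (fun _ hp => hp)
    | cons c t =>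
      rw [bScan]
      cases hf : bTable.find? (fun q => q.1.isPrefixOf (c :: t)) with
      | some q =>
        have hqmem := List.mem_of_find?_eq_some hf
        have hb := List.find?_some (p := fun q : List Char × List Char => q.1.isPrefixOf (c :: t)) hf
        have hpre : q.1 <+: (c :: t) := List.isPrefixOf_iff_prefix.mp hb
        have hkne := bTable_key_ne_nil q hqmem
        have hkpos : 0 < q.1.length := List.length_pos_iff.mpr hkne
        have hdec : q.1 ++ (c :: t).drop q.1.length = c :: t := by
          obtain ⟨w, hw⟩ := hpre
          rw [← hw, List.drop_left]
        have hlt : ((c :: t).drop q.1.length).length < n := by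
          simp only [List.length_drop, List.length_cons] at *
          omega
        calc chainC (c :: t) = chainC (q.1 ++ (c :: t).drop q.1.length) := by rw [hdec]
          _ = q.2 ++ chainC ((c :: t).drop q.1.length) := chain_match q hqmem _
          _ = q.2 ++ bScan ((c :: t).drop q.1.length) := by
              rw [ih _ hlt _ rfl]
      | none =>
        have hnp : ∀ p ∈ pvPairs, ¬ (p.1.toList <+: c :: t) := by
          intro p hp hpre
          obtain ⟨q, hq, hqk⟩ := pv_table_covers p hp
          have := List.find?_eq_none.mp hf q hq
          rw [hqk] at this
          exact this (List.isPrefixOf_iff_prefix.mpr hpre)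
        have h1 : chainC (c :: t) = c :: chainC t :=
          fold_cons pvPairs pv_key_len pv_SC_nc pvPairs (fun _ hp => hp) c t hnp
        rw [h1, ih t.length (by simp at hn; omega) t rfl]

theorem portA_toList : ∀ (ps : List (String × String)) (s : String),
    (ps.foldl (fun acc p => PySem.Str.replace acc p.1 p.2) s).toList = ps.foldl chainF s.toList := by
  intro ps
  induction ps with
  | nil => intro s; rfl
  | cons pr rest ih =>
    intro s
    simp only [List.foldl_cons]
    rw [ih (PySem.Str.replace s pr.1 pr.2)]
    congr 1
    exact PySem.Str.toList_replace s pr.1 pr.2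
-- ===== VERDICT (by name: the statement is the Claim_ definition above) =====
theorem vaultify_textbook_css_spec : Claim_equal_vaultify_textbook_css := by
  intro s _
  show vaultify_textbook_css s = vaultify_textbook_css_alt s
  have h1 : (vaultify_textbook_css s).toList = chainC s.toList := portA_toList pvPairs s
  have h2 : chainC s.toList = bScan s.toList := chain_eq_scan _ s.toList rfl
  have : (vaultify_textbook_css s).toList = (vaultify_textbook_css_alt s).toList := by
    rw [h1, h2, vaultify_textbook_css_alt, String.toList_ofList]
  calc vaultify_textbook_css s = String.ofList (vaultify_textbook_css s).toList := by
        rw [String.ofList_toList]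
    _ = String.ofList (vaultify_textbook_css_alt s).toList := by rw [this]
    _ = vaultify_textbook_css_alt s := by rw [String.ofList_toList]
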